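-- pv_equiv track=rewrite | github.com/hsidky/neurogen | src/neurogen/encoder.py | cmp_zorder
-- ===== SOURCE A (Python) =====
-- def cmp_zorder(lhs, rhs):
--     """Compare z-ordering
--
--     Code taken from https://en.wikipedia.org/wiki/Z-order_curve
--     """
--     def less_msb(x: int, y: int):
--         return x < y and x < (x ^ y)
--
--     # Assume lhs and rhs array-like objects of indices.
--     assert len(lhs) == len(rhs)
--     # Will contain the most significant dimension.
--     msd = 2
--     # Loop over the other dimensions.
--     for dim in [1, 0]:
--         # Check if the current dimension is more significant
--         # by comparing the most significant bits.
--         if less_msb(lhs[msd] ^ rhs[msd], lhs[dim] ^ rhs[dim]):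
--             msd = dim
--     return lhs[msd] - rhs[msd]
-- ===== SOURCE B (Python) =====
-- def cmp_zorder(lhs, rhs):
--     """Z-order comparison: return the coordinate difference in the dimension
--     whose XOR carries the most significant differing bit."""
--     assert len(lhs) == len(rhs)
--
--     def dominant(best, rest):
--         # best and the elements of rest are (xor, diff) pairs; recursively keep
--         # the pair whose xor carries the higher most-significant bit
--         # (x has a lower msb than y exactly when x < min(y, x ^ y)).
--         if not rest:
--             return best
--         cand = rest[0]
--         if best[0] < min(cand[0], best[0] ^ cand[0]):
--             best = cand
--         return dominant(best, rest[1:])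
--
--     pairs = [(l ^ r, l - r) for l, r in zip(lhs[:3], rhs[:3])]
--     return dominant(pairs[2], [pairs[1], pairs[0]])[1]
-- ===== Notes on version B (the rewrite author's own statement) =====
-- stated objective: alternative
-- what changed: The comparison order is semantically forced (A's msb test is non-transitive on negative XORs), so B keeps it but re-decomposes the function: a recursive scan over a precomputed list of (xor, diff) pairs replaces A's index-tracking loop and repeated re-indexing, and the msb test is written in the single-expression form x < min(y, x ^ y).
import Mathlib
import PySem

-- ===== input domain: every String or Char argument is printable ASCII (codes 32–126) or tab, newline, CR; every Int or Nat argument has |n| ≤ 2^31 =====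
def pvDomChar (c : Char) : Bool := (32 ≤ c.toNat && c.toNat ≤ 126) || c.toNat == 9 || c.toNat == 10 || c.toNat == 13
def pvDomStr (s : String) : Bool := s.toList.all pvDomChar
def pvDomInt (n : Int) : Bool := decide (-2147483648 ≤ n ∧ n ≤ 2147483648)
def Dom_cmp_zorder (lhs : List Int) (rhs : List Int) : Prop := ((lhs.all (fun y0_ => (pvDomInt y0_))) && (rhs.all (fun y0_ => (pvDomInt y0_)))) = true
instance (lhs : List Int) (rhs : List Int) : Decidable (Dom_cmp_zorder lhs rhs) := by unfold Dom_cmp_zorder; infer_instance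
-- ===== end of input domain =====

-- B re-decomposes A: a recursive scan over precomputed (xor, diff) pairs replaces the
-- index-tracking loop, with the msb test in the form x < min(y, x ^ y); same cost.

-- ===== PORT A =====
-- Python's `x < y and x < (x ^ y)`
def lessMsbA (x y : Int) : Bool := decide (x < y) && decide (x < Int.xor x y)

-- lhs[i]/rhs[i]; indices are in range on every input admitted by Pre_, so the `.getD 0` default is never used there
def pyAt (xs : List Int) (i : Int) : Int := (PySem.List.pyGet? xs i).getD 0

def cmp_zorder (lhs : List Int) (rhs : List Int) : Int :=
  -- msd = 2; for dim in [1, 0]: if less_msb(lhs[msd]^rhs[msd], lhs[dim]^rhs[dim]): msd = dim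
  let msd := [(1 : Int), 0].foldl
    (fun msd dim =>
      if lessMsbA (Int.xor (pyAt lhs msd) (pyAt rhs msd)) (Int.xor (pyAt lhs dim) (pyAt rhs dim))
      then dim else msd) 2
  pyAt lhs msd - pyAt rhs msd

-- ===== PORT B =====
-- B's recursive helper over (xor, diff) pairs
def dominantB : (Int × Int) → List (Int × Int) → (Int × Int)
  | best, [] => best
  | best, cand :: rest =>
      dominantB (if best.1 < min cand.1 (Int.xor best.1 cand.1) then cand else best) rest

-- pairs[i]; in range under Pre_, so the default is never used there
def pairAt (ps : List (Int × Int)) (i : Int) : Int × Int := (PySem.List.pyGet? ps i).getD (0, 0)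

def cmp_zorder_alt (lhs : List Int) (rhs : List Int) : Int :=
  -- pairs = [(l ^ r, l - r) for l, r in zip(lhs[:3], rhs[:3])]  (lhs[:3] = take 3, bounds nonneg)
  let pairs := (List.zip (lhs.take 3) (rhs.take 3)).map (fun p => (Int.xor p.1 p.2, p.1 - p.2))
  (dominantB (pairAt pairs 2) [pairAt pairs 1, pairAt pairs 0]).2

-- ===== PRECONDITION & SPEC =====
-- A's assert requires equal lengths, and lhs[2]/rhs[2] raise IndexError on shorter lists.
def Pre_cmp_zorder (lhs : List Int) (rhs : List Int) : Prop :=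
  lhs.length = rhs.length ∧ 3 ≤ lhs.length
instance (lhs : List Int) (rhs : List Int) : Decidable (Pre_cmp_zorder lhs rhs) := by
  unfold Pre_cmp_zorder; infer_instance

def pvWitness_cmp_zorder : List Int × List Int := ([1, 2, 3], [4, 5, 6])

def Spec_cmp_zorder (lhs : List Int) (rhs : List Int) (out : Int) : Prop := out = cmp_zorder_alt lhs rhs
instance (lhs : List Int) (rhs : List Int) (out : Int) : Decidable (Spec_cmp_zorder lhs rhs out) := by unfold Spec_cmp_zorder; infer_instance

-- ===== CLAIM (what is proved, stated in full; the proofs are below) =====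
def Claim_equal_cmp_zorder : Prop := ∀ (lhs : List Int) (rhs : List Int), Dom_cmp_zorder lhs rhs → Pre_cmp_zorder lhs rhs → Spec_cmp_zorder lhs rhs (cmp_zorder lhs rhs)

-- ===== LEMMAS AND PROOFS =====

theorem pv_lessA_iff (x y : Int) : lessMsbA x y = true ↔ x < min y (Int.xor x y) := by
  simp [lessMsbA]

theorem pv_at0 (x y z : Int) (l : List Int) : pyAt (x :: y :: z :: l) 0 = x := by
  simp [pyAt, PySem.List.pyGet?_of_nonneg]

theorem pv_at1 (x y z : Int) (l : List Int) : pyAt (x :: y :: z :: l) 1 = y := by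
  simp [pyAt, PySem.List.pyGet?_of_nonneg]

theorem pv_at2 (x y z : Int) (l : List Int) : pyAt (x :: y :: z :: l) 2 = z := by
  simp [pyAt, PySem.List.pyGet?_of_nonneg]

theorem pv_pairAt (p q r : Int × Int) :
    pairAt [p, q, r] 0 = p ∧ pairAt [p, q, r] 1 = q ∧ pairAt [p, q, r] 2 = r := by
  refine ⟨?_, ?_, ?_⟩ <;> simp [pairAt]

theorem pv_main (a b c d e f : Int) (ls rs : List Int) :
    cmp_zorder (a :: b :: c :: ls) (d :: e :: f :: rs)
      = cmp_zorder_alt (a :: b :: c :: ls) (d :: e :: f :: rs) := by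
  obtain ⟨hp0, hp1, hp2⟩ :=
    pv_pairAt (Int.xor a d, a - d) (Int.xor b e, b - e) (Int.xor c f, c - f)
  simp only [cmp_zorder, cmp_zorder_alt, List.foldl, List.take, List.zip, List.zipWith,
    List.map, pv_at0, pv_at1, pv_at2, hp0, hp1, hp2]
  by_cases h1 : Int.xor c f < min (Int.xor b e) (Int.xor (Int.xor c f) (Int.xor b e)) <;>
    by_cases h2 : Int.xor c f < min (Int.xor a d) (Int.xor (Int.xor c f) (Int.xor a d)) <;>
      by_cases h3 : Int.xor b e < min (Int.xor a d) (Int.xor (Int.xor b e) (Int.xor a d)) <;>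
        simp [dominantB, pv_lessA_iff, pv_at0, pv_at1, pv_at2, h1, h2, h3]
-- ===== VERDICT (by name: the statement is the Claim_ definition above) =====
theorem cmp_zorder_spec : Claim_equal_cmp_zorder := by
  intro lhs rhs _ hpre
  obtain ⟨hlen, h3⟩ := hpre
  match lhs, rhs with
  | a :: b :: c :: ls, d :: e :: f :: rs => exact pv_main a b c d e f ls rs
  | [], _ => simp at h3
  | [_], _ => simp at h3
  | [_, _], _ => simp at h3
  | _ :: _ :: _ :: _, [] => simp at hlen
  | _ :: _ :: _ :: _, [_] => simp at hlen
  | _ :: _ :: _ :: _, [_, _] => simp at hlen
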